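-- pv_equiv track=rewrite | github.com/BigT001/promptplay | script_writing_agent/ai_service.py | _extract_characters_from_text
-- ===== SOURCE A (Python) =====
-- from typing import Dict, Any, Optional, List
--
-- def _extract_characters_from_text(text: str, is_main: bool = True) -> List[Dict]:
--     """Extract character information from AI response text."""
--     characters = []
--     lines = text.split('\n')
--     current_character = None
--
--     for line in lines:
--         if ':' in line and not current_character:
--             name = line.split(':')[0].strip()
--             desc = line.split(':')[1].strip()
--             current_character = {
--                 "name": name,
--                 "description": desc,
--                 "role": "Protagonist" if is_main else "Supporting"
--             }
--             characters.append(current_character)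
--         elif current_character and line.strip():
--             current_character["description"] += " " + line.strip()
--
--     return characters
-- ===== SOURCE B (Python) =====
-- from typing import Dict, Any, Optional, List
--
-- def _extract_characters_from_text(text: str, is_main: bool = True) -> List[Dict]:
--     """Extract character information from AI response text."""
--     lines = text.split('\n')
--     # find the first line containing ':'
--     idx = next((i for i, l in enumerate(lines) if ':' in l), None)
--     if idx is None:
--         return []
--     parts = lines[idx].split(':')
--     desc = parts[1].strip()
--     for line in lines[idx + 1:]:
--         s = line.strip()
--         if s:
--             desc += " " + s
--     return [{
--         "name": parts[0].strip(),
--         "description": desc,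
--         "role": "Protagonist" if is_main else "Supporting",
--     }]
-- ===== Notes on version B (the rewrite author's own statement) =====
-- stated objective: alternative
-- what changed: Replaces A's flag-driven single pass with an Option state by a find-the-first-header scan followed by a plain accumulation loop over only the lines after the header.
import Mathlib
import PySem

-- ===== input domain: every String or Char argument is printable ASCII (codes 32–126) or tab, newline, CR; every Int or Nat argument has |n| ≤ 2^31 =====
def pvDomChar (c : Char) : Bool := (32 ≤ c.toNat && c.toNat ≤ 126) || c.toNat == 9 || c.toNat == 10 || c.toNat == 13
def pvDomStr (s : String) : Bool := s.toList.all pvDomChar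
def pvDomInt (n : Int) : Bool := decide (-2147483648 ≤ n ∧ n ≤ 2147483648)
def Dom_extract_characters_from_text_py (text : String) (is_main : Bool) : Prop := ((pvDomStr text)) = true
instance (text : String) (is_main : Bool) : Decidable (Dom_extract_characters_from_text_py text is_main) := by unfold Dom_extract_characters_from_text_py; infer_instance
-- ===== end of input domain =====

-- B restructures A's flag-driven single pass into find-header-then-accumulate; equivalence of the RETURN value
-- (A's returned list aliases the mutated current_character dict, so the returned dict carries the final description;
--  the ports model the dict by its (name, description) fields with the fixed literal keys assembled at the end).

-- ===== PORT A =====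
-- loop state: current_character as Option (name, description); characters == [current_character] when set
def pvA_step (cur : Option (String × String)) (line : String) : Option (String × String) :=
  if PySem.Str.isIn ":" line && cur.isNone then
    let ps := (PySem.Str.split? line ":").getD []
    some (PySem.Str.strip (ps.getD 0 ""), PySem.Str.strip (ps.getD 1 ""))
  else
    match cur with
    | some (n, d) =>
        if PySem.Str.strip line ≠ "" then some (n, d ++ " " ++ PySem.Str.strip line) else some (n, d)
    | none => none

def extract_characters_from_text_py (text : String) (is_main : Bool) : List (List (String × String)) :=
  let lines := (PySem.Str.split? text "\n").getD []
  match lines.foldl pvA_step none with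
  | none => []
  | some (n, d) => [[("name", n), ("description", d), ("role", if is_main then "Protagonist" else "Supporting")]]

-- ===== PORT B =====
-- find the first line containing ':' and return it with the remaining lines
def pvB_findColon : List String → Option (String × List String)
  | [] => none
  | l :: ls => if PySem.Str.isIn ":" l then some (l, ls) else pvB_findColon ls

def pvB_accum (d : String) (line : String) : String :=
  if PySem.Str.strip line ≠ "" then d ++ " " ++ PySem.Str.strip line else d

def extract_characters_from_text_py_alt (text : String) (is_main : Bool) : List (List (String × String)) :=
  match pvB_findColon ((PySem.Str.split? text "\n").getD []) with
  | none => []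
  | some (hdr, rest) =>
    let ps := (PySem.Str.split? hdr ":").getD []
    let desc := rest.foldl pvB_accum (PySem.Str.strip (ps.getD 1 ""))
    [[("name", PySem.Str.strip (ps.getD 0 "")), ("description", desc),
      ("role", if is_main then "Protagonist" else "Supporting")]]

-- ===== PRECONDITION & SPEC =====
def Spec_extract_characters_from_text_py (text : String) (is_main : Bool) (out : List (List (String × String))) : Prop := out = extract_characters_from_text_py_alt text is_main
instance (text : String) (is_main : Bool) (out : List (List (String × String))) : Decidable (Spec_extract_characters_from_text_py text is_main out) := by unfold Spec_extract_characters_from_text_py; infer_instance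

-- ===== CLAIM (what is proved, stated in full; the proofs are below) =====
def Claim_equal_extract_characters_from_text_py : Prop := ∀ (text : String) (is_main : Bool), Dom_extract_characters_from_text_py text is_main → Spec_extract_characters_from_text_py text is_main (extract_characters_from_text_py text is_main)

-- ===== LEMMAS AND PROOFS =====

-- once the state is set, A's step only accumulates the stripped non-empty lines
theorem pvA_step_some (n d : String) (line : String) :
    pvA_step (some (n, d)) line = some (n, pvB_accum d line) := by
  simp only [pvA_step, pvB_accum, Option.isNone_some, Bool.and_false, Bool.false_eq_true,
    if_false]
  split_ifs <;> rfl

theorem pvA_fold_some (rest : List String) (n d : String) :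
    rest.foldl pvA_step (some (n, d)) = some (n, rest.foldl pvB_accum d) := by
  induction rest generalizing d with
  | nil => rfl
  | cons l ls ih => simp [List.foldl, pvA_step_some, ih]

-- before a header line, A's fold stays at none and matches B's header search
theorem pvA_fold_none (lines : List String) :
    lines.foldl pvA_step none =
      match pvB_findColon lines with
      | none => none
      | some (hdr, rest) =>
          let ps := (PySem.Str.split? hdr ":").getD []
          some (PySem.Str.strip (ps.getD 0 ""), rest.foldl pvB_accum (PySem.Str.strip (ps.getD 1 ""))) := by
  induction lines with
  | nil => rfl
  | cons l ls ih =>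
    by_cases h : PySem.Chars.isIn [':'] l.toList = true
    · simp [List.foldl, pvA_step, pvB_findColon, h, pvA_fold_some]
    · simp only [List.foldl, pvB_findColon]
      have h1 : pvA_step none l = none := by simp [pvA_step, h]
      rw [h1, ih]
      simp [h]

-- ===== VERDICT (by name: the statement is the Claim_ definition above) =====
theorem extract_characters_from_text_py_spec : Claim_equal_extract_characters_from_text_py := by
  intro text is_main _
  unfold Spec_extract_characters_from_text_py extract_characters_from_text_py extract_characters_from_text_py_alt
  dsimp only
  rw [pvA_fold_none]
  cases h : pvB_findColon ((PySem.Str.split? text "\n").getD []) with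
  | none => rfl
  | some p =>
    cases p with
    | mk hdr rest => rfl
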